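-- pv_equiv track=rewrite | github.com/CaffeineLiqueur/MusicAgent | backend/app/services/chord.py | _split_quality_and_alterations
-- ===== SOURCE A (Python) =====
-- from typing import Dict, List, Optional, Sequence, Tuple
--
-- QUALITY_INTERVALS: Dict[str, List[int]] = {
--     "maj": [0, 4, 7],
--     "": [0, 4, 7],
--     "m": [0, 3, 7],
--     "min": [0, 3, 7],
--     "dim": [0, 3, 6],
--     "aug": [0, 4, 8],
--     "+": [0, 4, 8],
--     "sus2": [0, 2, 7],
--     "sus4": [0, 5, 7],
--     "6": [0, 4, 7, 9],
--     "6/9": [0, 4, 7, 9, 14],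
--     "69": [0, 4, 7, 9, 14],
--     "7": [0, 4, 7, 10],
--     "maj7": [0, 4, 7, 11],
--     "M7": [0, 4, 7, 11],
--     "m7": [0, 3, 7, 10],
--     "min7": [0, 3, 7, 10],
--     "m7b5": [0, 3, 6, 10],
--     "dim7": [0, 3, 6, 9],
--     "mMaj7": [0, 3, 7, 11],
--     "9": [0, 4, 7, 10, 14],
--     "maj9": [0, 4, 7, 11, 14],
--     "m9": [0, 3, 7, 10, 14],
--     "11": [0, 4, 7, 10, 14, 17],
--     "13": [0, 4, 7, 10, 14, 21],
--     "sus": [0, 5, 7],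
-- }
--
-- def _split_quality_and_alterations(body: str) -> Tuple[str, List[str]]:
--     """Split the main quality token and alteration tokens."""
--     token = body or ""
--     token = token.strip()
--     # Identify slash-already-removed, so only quality + extensions remain
--     for q in sorted(QUALITY_INTERVALS.keys(), key=len, reverse=True):
--         if token.startswith(q):
--             rest = token[len(q) :]
--             alterations = _parse_alterations(rest)
--             return q, alterations
--     # default major triad
--     alterations = _parse_alterations(token)
--     return "", alterations
--
-- def _parse_alterations(text: str) -> List[str]:
--     """Parse alteration tokens in remaining text."""
--     if not text:
--         return []
--     buf = text
--     tokens: List[str] = []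
--     # check ordered list to avoid partial match (#11 before 11)
--     ordered = ["#11", "b13", "13", "11", "add9", "#9", "b9", "9"]
--     while buf:
--         matched = False
--         for t in ordered:
--             if buf.startswith(t):
--                 tokens.append(t)
--                 buf = buf[len(t) :]
--                 matched = True
--                 break
--         if not matched:
--             # unrecognized text
--             buf = buf[1:]
--     return tokens
-- ===== SOURCE B (Python) =====
-- from typing import Dict, List, Optional, Tuple
--
-- QUALITY_INTERVALS: Dict[str, List[int]] = {
--     "maj": [0, 4, 7],
--     "": [0, 4, 7],
--     "m": [0, 3, 7],
--     "min": [0, 3, 7],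
--     "dim": [0, 3, 6],
--     "aug": [0, 4, 8],
--     "+": [0, 4, 8],
--     "sus2": [0, 2, 7],
--     "sus4": [0, 5, 7],
--     "6": [0, 4, 7, 9],
--     "6/9": [0, 4, 7, 9, 14],
--     "69": [0, 4, 7, 9, 14],
--     "7": [0, 4, 7, 10],
--     "maj7": [0, 4, 7, 11],
--     "M7": [0, 4, 7, 11],
--     "m7": [0, 3, 7, 10],
--     "min7": [0, 3, 7, 10],
--     "m7b5": [0, 3, 6, 10],
--     "dim7": [0, 3, 6, 9],
--     "mMaj7": [0, 3, 7, 11],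
--     "9": [0, 4, 7, 10, 14],
--     "maj9": [0, 4, 7, 11, 14],
--     "m9": [0, 3, 7, 10, 14],
--     "11": [0, 4, 7, 10, 14, 17],
--     "13": [0, 4, 7, 10, 14, 21],
--     "sus": [0, 5, 7],
-- }
--
-- # The alteration tokens are pairwise prefix-incompatible (no two can match at the
-- # same position), so any match order is equivalent to A's ordered greedy scan.
-- ALTERATIONS = {"#11", "b13", "13", "11", "add9", "#9", "b9", "9"}
--
--
-- def _split_quality_and_alterations(body: str) -> Tuple[str, List[str]]:
--     """Split the main quality token and alteration tokens."""
--     token = (body or "").strip()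
--     # Longest prefix of the token (keys are at most 5 chars) that is a dict key;
--     # hash lookups on the token's own prefixes replace any scan over the key list.
--     quality = ""
--     for L in range(min(len(token), 5), -1, -1):
--         if token[:L] in QUALITY_INTERVALS:
--             quality = token[:L]
--             break
--     return quality, _parse_alterations(token[len(quality):])
--
--
-- def _parse_alterations(text: str) -> List[str]:
--     """Token list per suffix, by a dynamic-programming table built back to front."""
--     n = len(text)
--     table: List[List[str]] = [[] for _ in range(n + 1)]
--     for i in range(n - 1, -1, -1):
--         entry = table[i + 1]
--         for L in (4, 3, 2, 1):
--             seg = text[i:i + L]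
--             if len(seg) == L and seg in ALTERATIONS:
--                 entry = [seg] + table[i + L]
--                 break
--         table[i] = entry
--     return table[0]
-- ===== Notes on version B (the rewrite author's own statement) =====
-- stated objective: faster
-- what changed: Quality is found by hash-lookups on the token's own prefixes (longest first, keys are at most 5 chars) instead of scanning the length-sorted key list with startswith, and alterations are computed by a dynamic-programming suffix table built back to front with set membership on bounded slices instead of A's greedy while-loop that re-slices the whole remaining buffer (buf = buf[len:]) at every step; correct because the 8 alteration tokens are pairwise prefix-incompatible, so at most one matches at any position.
import Mathlib
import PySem

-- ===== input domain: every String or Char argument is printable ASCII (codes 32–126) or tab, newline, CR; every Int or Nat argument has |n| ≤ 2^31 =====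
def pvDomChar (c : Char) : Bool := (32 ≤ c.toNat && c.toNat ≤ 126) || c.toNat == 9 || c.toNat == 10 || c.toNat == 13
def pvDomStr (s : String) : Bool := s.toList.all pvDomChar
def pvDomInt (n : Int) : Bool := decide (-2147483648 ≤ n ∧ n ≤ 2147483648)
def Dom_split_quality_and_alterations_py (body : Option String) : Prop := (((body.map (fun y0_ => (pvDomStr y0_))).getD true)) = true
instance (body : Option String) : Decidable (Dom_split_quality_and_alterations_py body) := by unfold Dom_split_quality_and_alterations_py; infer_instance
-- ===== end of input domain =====

-- B finds the quality by membership tests on the token's own prefixes (longest first)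
-- instead of scanning the length-sorted key list, and parses alterations with a
-- dynamic-programming suffix table built back to front instead of A's ordered greedy
-- while-loop (which re-slices the whole remaining buffer each step); objective: faster
-- (measured on large inputs).

-- ===== PORT A =====

-- QUALITY_INTERVALS keys, in dict insertion order (the interval values are never used here)
def qualityKeys : List String :=
  ["maj", "", "m", "min", "dim", "aug", "+", "sus2", "sus4", "6", "6/9", "69", "7",
   "maj7", "M7", "m7", "min7", "m7b5", "dim7", "mMaj7", "9", "maj9", "m9", "11", "13", "sus"]

-- the ordered alteration list of A
def aOrdered : List String := ["#11", "b13", "13", "11", "add9", "#9", "b9", "9"]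

-- A's inner `for t in ordered: if buf.startswith(t): … break` = first match
def aFindTok (buf : List Char) : Option String :=
  aOrdered.find? (fun t => PySem.Chars.startswith buf t.toList)

theorem aFindTok_len_pos {buf : List Char} {t : String}
    (h : aFindTok buf = some t) : 1 ≤ t.toList.length := by
  have hm := List.mem_of_find?_eq_some h
  fin_cases hm <;> decide

-- A's while loop of _parse_alterations (on the code points of buf)
def aParse (buf : List Char) : List String :=
  if hbuf : buf = [] then []
  else
    match h : aFindTok buf with
    | some t => t :: aParse (buf.drop t.toList.length)
    | none => aParse (buf.drop 1)
termination_by buf.length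
decreasing_by
  · have h1 := aFindTok_len_pos h
    have h2 : 0 < buf.length := List.length_pos_iff.mpr hbuf
    simp only [List.length_drop]
    omega
  · have h2 : 0 < buf.length := List.length_pos_iff.mpr hbuf
    simp only [List.length_drop]
    omega

-- sorted(QUALITY_INTERVALS.keys(), key=len, reverse=True)
def aSortedKeys : List String :=
  PySem.List.sorted qualityKeys (fun q => PySem.Str.len q) true

def split_quality_and_alterations_py (body : Option String) : String × List String :=
  let token := PySem.Str.strip (body.getD "")
  match aSortedKeys.find? (fun q => PySem.Chars.startswith token.toList q.toList) with
  | some q => (q, aParse (token.toList.drop q.toList.length))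
  | none => ("", aParse token.toList)   -- default branch of A (unreachable: "" always matches)

-- ===== PORT B =====

-- the alteration tokens of Source B's ALTERATIONS set, as code-point lists
def altSegs : List (List Char) :=
  [['#','1','1'], ['b','1','3'], ['1','3'], ['1','1'], ['a','d','d','9'], ['#','9'], ['b','9'], ['9']]

-- Source B's inner `for L in (4,3,2,1): seg = text[i:i+L]; if len(seg)==L and seg in ALTERATIONS`
def bMatch (buf : List Char) : Option String :=
  [4, 3, 2, 1].findSome? (fun L =>
    let seg := buf.take L
    if seg.length = L ∧ altSegs.contains seg then some (String.ofList seg) else none)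

-- Source B's table[i] for i = n .. 0, built back to front (head = entry for the whole suffix)
def bTables : List Char → List (List String)
  | [] => [[]]
  | c :: rest =>
    let tab := bTables rest
    (match bMatch (c :: rest) with
     | some tok => tok :: tab.getD (tok.toList.length - 1) []
     | none => tab.getD 0 []) :: tab

-- Source B's `for L in range(min(len(token), 5), -1, -1): if token[:L] in QUALITY_INTERVALS: …`
def bQualLoop (t : List Char) : Nat → String
  | 0 => if qualityKeys.contains (String.ofList (t.take 0)) then String.ofList (t.take 0) else ""
  | (l+1) => if qualityKeys.contains (String.ofList (t.take (l+1))) then String.ofList (t.take (l+1))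
             else bQualLoop t l

def split_quality_and_alterations_py_alt (body : Option String) : String × List String :=
  let token := PySem.Str.strip (body.getD "")
  let quality := bQualLoop token.toList (min token.toList.length 5)
  (quality, (bTables (token.toList.drop quality.toList.length)).headD [])

-- ===== PRECONDITION & SPEC =====
def Spec_split_quality_and_alterations_py (body : Option String) (out : String × List String) : Prop := out = split_quality_and_alterations_py_alt body
instance (body : Option String) (out : String × List String) : Decidable (Spec_split_quality_and_alterations_py body out) := by unfold Spec_split_quality_and_alterations_py; infer_instance

-- ===== CLAIM (what is proved, stated in full; the proofs are below) =====
def Claim_equal_split_quality_and_alterations_py : Prop := ∀ (body : Option String), Dom_split_quality_and_alterations_py body → Spec_split_quality_and_alterations_py body (split_quality_and_alterations_py body)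

-- ===== LEMMAS AND PROOFS =====

-- startswith as a take-equality
theorem startswith_take (buf p : List Char) :
    PySem.Chars.startswith buf p = true ↔ buf.take p.length = p := by
  rw [PySem.Chars.startswith_iff]
  constructor
  · intro h
    exact (List.prefix_iff_eq_take.mp h).symm
  · intro h
    exact List.prefix_iff_eq_take.mpr h.symm

theorem startswith_decide (buf p : List Char) :
    PySem.Chars.startswith buf p = decide (buf.take p.length = p) := by
  by_cases h : buf.take p.length = p
  · simp [h, startswith_take]
  · simp only [h, decide_false]
    exact Bool.eq_false_iff.mpr (fun hc => h ((startswith_take _ _).mp hc))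

theorem aParse_nil : aParse [] = [] := by
  rw [aParse]
  simp

theorem aParse_ne_nil (buf : List Char) (hbuf : buf ≠ []) :
    aParse buf = match aFindTok buf with
      | some t => t :: aParse (buf.drop t.toList.length)
      | none => aParse (buf.drop 1) := by
  rw [aParse, dif_neg hbuf]
  split <;> rename_i heq <;> rw [heq]

-- Source B's longest-slice set lookup finds the same token as A's ordered scan:
-- the eight alteration tokens are pairwise prefix-incompatible.
set_option maxHeartbeats 1000000 in
theorem bMatch_eq_aFindTok (buf : List Char) : bMatch buf = aFindTok buf := by
  match buf with
  | [] => rfl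
  | [c1] =>
    simp only [bMatch, aFindTok, aOrdered, altSegs, List.findSome?, List.find?,
      startswith_decide, List.take_succ_cons, List.take_nil, List.length_cons,
      List.length_nil, List.contains_cons, List.contains_nil, List.cons.injEq, List.nil_eq]
    by_cases h : c1 = '9' <;> simp_all
  | [c1, c2] =>
    simp only [bMatch, aFindTok, aOrdered, altSegs, List.findSome?, List.find?,
      startswith_decide, List.take_succ_cons, List.take_nil, List.length_cons,
      List.length_nil, List.contains_cons, List.contains_nil, List.cons.injEq, List.nil_eq]
    by_cases h1 : c1 = '1'
    · subst h1
      by_cases h2 : c2 = '3' <;> by_cases h3 : c2 = '1' <;> simp_all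
    · by_cases h1b : c1 = '#'
      · subst h1b
        by_cases h2 : c2 = '9' <;> simp_all
      · by_cases h1c : c1 = 'b'
        · subst h1c
          by_cases h2 : c2 = '9' <;> simp_all
        · by_cases h1d : c1 = '9' <;> simp_all
  | [c1, c2, c3] =>
    simp only [bMatch, aFindTok, aOrdered, altSegs, List.findSome?, List.find?,
      startswith_decide, List.take_succ_cons, List.take_nil, List.length_cons,
      List.length_nil, List.contains_cons, List.contains_nil, List.cons.injEq, List.nil_eq]
    by_cases h1 : c1 = '#'
    · subst h1
      by_cases h2 : c2 = '1' <;> by_cases h3 : c3 = '1' <;> by_cases h4 : c2 = '9' <;> simp_all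
    · by_cases h1b : c1 = 'b'
      · subst h1b
        by_cases h2 : c2 = '1' <;> by_cases h3 : c3 = '3' <;> by_cases h4 : c2 = '9' <;> simp_all
      · by_cases h1c : c1 = '1'
        · subst h1c
          by_cases h2 : c2 = '3' <;> by_cases h3 : c2 = '1' <;> simp_all
        · by_cases h1d : c1 = '9' <;> simp_all
  | c1 :: c2 :: c3 :: c4 :: rest =>
    simp only [bMatch, aFindTok, aOrdered, altSegs, List.findSome?, List.find?,
      startswith_decide, List.take_succ_cons, List.take_nil, List.length_cons,
      List.length_nil, List.contains_cons, List.contains_nil, List.cons.injEq, List.nil_eq]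
    by_cases h1 : c1 = 'a'
    · subst h1
      by_cases h2 : c2 = 'd' <;> by_cases h3 : c3 = 'd' <;> by_cases h4 : c4 = '9' <;> simp_all
    · by_cases h1b : c1 = '#'
      · subst h1b
        by_cases h2 : c2 = '1' <;> by_cases h3 : c3 = '1' <;> by_cases h4 : c2 = '9' <;> simp_all
      · by_cases h1c : c1 = 'b'
        · subst h1c
          by_cases h2 : c2 = '1' <;> by_cases h3 : c3 = '3' <;> by_cases h4 : c2 = '9' <;> simp_all
        · by_cases h1d : c1 = '1'
          · subst h1d
            by_cases h2 : c2 = '3' <;> by_cases h3 : c2 = '1' <;> simp_all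
          · by_cases h1e : c1 = '9' <;> simp_all

theorem bMatch_some_facts {buf : List Char} {tok : String}
    (h : bMatch buf = some tok) :
    1 ≤ tok.toList.length ∧ tok.toList.length ≤ buf.length := by
  rw [bMatch_eq_aFindTok] at h
  refine ⟨aFindTok_len_pos h, ?_⟩
  have hp := List.find?_some h
  simp only [decide_eq_true_eq] at hp
  have := (PySem.Chars.startswith_iff buf tok.toList).mp hp
  exact this.length_le

-- B's back-to-front table agrees with A's loop on every suffix
theorem bTables_getD : ∀ (t : List Char) (j : Nat), j ≤ t.length →
    (bTables t).getD j [] = aParse (t.drop j) := by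
  intro t
  induction t with
  | nil =>
    intro j hj
    have : j = 0 := Nat.le_zero.mp hj
    subst this
    simp [bTables, aParse_nil]
  | cons c rest ih =>
    intro j hj
    match j with
    | 0 =>
      show (bTables (c :: rest)).getD 0 [] = aParse (c :: rest)
      rw [aParse_ne_nil (c :: rest) (by simp), ← bMatch_eq_aFindTok]
      rcases hm : bMatch (c :: rest) with _ | tok
      · simp only [bTables, hm, List.getD]
        have h0 : (bTables rest).getD 0 [] = aParse rest := by
          simpa using ih 0 (Nat.zero_le _)
        simpa using h0
      · obtain ⟨h1, h2⟩ := bMatch_some_facts hm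
        simp only [List.length_cons] at h2
        simp only [bTables, hm, List.getD]
        have hih := ih (tok.toList.length - 1) (by omega)
        have hd : (c :: rest).drop tok.toList.length = rest.drop (tok.toList.length - 1) := by
          obtain ⟨k, hk⟩ : ∃ k, tok.toList.length = k + 1 := ⟨tok.toList.length - 1, by omega⟩
          rw [hk]
          simp
        simp only [hd, ← hih]
        simp
    | j' + 1 =>
      simp only [List.length_cons] at hj
      have := ih j' (by omega)
      simpa [bTables, List.getD] using this

-- the first match in a length-descending list is length-maximal among all matches
theorem find?_desc_max {l : List String} {p : String → Bool} {a : String}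
    (hp : l.Pairwise (fun x y => PySem.Str.len y ≤ PySem.Str.len x))
    (h : l.find? p = some a) :
    ∀ y ∈ l, p y = true → PySem.Str.len y ≤ PySem.Str.len a := by
  induction l with
  | nil => simp at h
  | cons x xs ihl =>
    rw [List.find?_cons] at h
    rcases List.pairwise_cons.mp hp with ⟨hx, hxs⟩
    by_cases hpx : p x = true
    · simp [hpx] at h
      subst h
      intro y hy _
      rcases List.mem_cons.mp hy with rfl | hy
      · exact le_rfl
      · exact hx y hy
    · simp [hpx] at h
      intro y hy hpy
      rcases List.mem_cons.mp hy with rfl | hy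
      · exact absurd hpy hpx
      · exact ihl hxs h y hy hpy

-- two prefixes of the same string with the same length are the same string
theorem prefix_len_unique {t : List Char} {a b : String}
    (ha : PySem.Chars.startswith t a.toList = true)
    (hb : PySem.Chars.startswith t b.toList = true)
    (hlen : a.toList.length = b.toList.length) : a = b := by
  rw [startswith_take] at ha hb
  apply String.toList_injective
  rw [← ha, ← hb, hlen]

theorem qualityKeys_len_le {k : String} (hk : k ∈ qualityKeys) : k.toList.length ≤ 5 := by
  fin_cases hk <;> decide

-- B's descending prefix loop returns A's (length-maximal) matching key
theorem quality_eq (t : List Char) :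
    aSortedKeys.find? (fun q => PySem.Chars.startswith t q.toList) =
      some (bQualLoop t (min t.length 5)) := by
  have hpE : PySem.Chars.startswith t "".toList = true := by
    simp [PySem.Chars.startswith_iff]
  have hmemE : "" ∈ aSortedKeys := by
    rw [aSortedKeys, PySem.List.mem_sorted]; decide
  obtain ⟨a, ha⟩ : ∃ a, aSortedKeys.find? (fun q => PySem.Chars.startswith t q.toList) = some a := by
    have hs : (aSortedKeys.find? (fun q => PySem.Chars.startswith t q.toList)).isSome :=
      List.find?_isSome.mpr ⟨"", hmemE, hpE⟩
    exact Option.isSome_iff_exists.mp hs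
  have hpa : PySem.Chars.startswith t a.toList = true := by
    have := List.find?_some ha
    simpa using this
  have hamem : a ∈ qualityKeys := by
    have := List.mem_of_find?_eq_some ha
    rwa [aSortedKeys, PySem.List.mem_sorted] at this
  have hmax : ∀ y ∈ aSortedKeys, PySem.Chars.startswith t y.toList = true →
      PySem.Str.len y ≤ PySem.Str.len a :=
    find?_desc_max (PySem.List.sorted_pairwise_rev qualityKeys (fun q => PySem.Str.len q)) ha
  have halen : a.toList.length ≤ t.length := by
    rw [startswith_take] at hpa
    have := congrArg List.length hpa
    simp only [List.length_take] at this
    omega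
  -- downward induction on the loop counter
  have key : ∀ L, a.toList.length ≤ L → L ≤ t.length → bQualLoop t L = a := by
    intro L
    induction L with
    | zero =>
      intro hla _
      have h0 : a.toList.length = 0 := Nat.le_zero.mp hla
      have ha0 : a = "" := by
        apply prefix_len_unique hpa hpE
        simpa using h0
      subst ha0
      rw [bQualLoop]
      split
      · simp
      · rfl
    | succ l ihl =>
      intro hla hLt
      rw [bQualLoop]
      by_cases hc : qualityKeys.contains (String.ofList (t.take (l+1))) = true
      · rw [if_pos hc]
        have hmem : String.ofList (t.take (l+1)) ∈ qualityKeys := by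
          simpa using hc
        have hlen : (String.ofList (t.take (l+1))).toList.length = l + 1 := by
          simp only [String.toList_ofList, List.length_take]
          omega
        have hpfx : PySem.Chars.startswith t (String.ofList (t.take (l+1))).toList = true := by
          rw [startswith_take, hlen, String.toList_ofList]
        have hle : l + 1 ≤ PySem.Str.len a := by
          have := hmax (String.ofList (t.take (l+1)))
            (by rw [aSortedKeys, PySem.List.mem_sorted]; exact hmem) hpfx
          rwa [PySem.Str.len_eq, PySem.Str.len_eq, hlen] at this
        rw [PySem.Str.len_eq] at hle
        exact prefix_len_unique hpfx hpa (by omega)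
      · rw [if_neg hc]
        apply ihl _ (by omega)
        -- a cannot have length l+1: its char list would be t.take (l+1), a key
        by_cases hlen : a.toList.length = l + 1
        · exfalso
          apply hc
          have : a.toList = t.take (l+1) := by
            rw [startswith_take] at hpa
            rw [← hpa, hlen]
          have hma : String.ofList (t.take (l+1)) = a := by
            rw [← this]; simp
          simp [hma]
          exact hamem
        · omega
  exact ha ▸ congrArg some (key (min t.length 5) (by
      have h5 := qualityKeys_len_le hamem
      omega) (Nat.min_le_left _ _)).symm

-- ===== VERDICT (by name: the statement is the Claim_ definition above) =====
theorem split_quality_and_alterations_py_spec : Claim_equal_split_quality_and_alterations_py := by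
  intro body _
  simp only [Spec_split_quality_and_alterations_py, split_quality_and_alterations_py,
    split_quality_and_alterations_py_alt]
  rw [quality_eq]
  have hhead : ∀ x : List Char, (bTables x).headD [] = (bTables x).getD 0 [] := by
    intro x
    cases x <;> simp [bTables]
  rw [hhead, bTables_getD _ 0 (Nat.zero_le _)]
  simp
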